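-- pv_equiv track=rewrite | github.com/MultiAgentLearning/playground | games/a/pommerman/envs/utility.py | is_valid_direction
-- ===== SOURCE A (Python) =====
-- from enum import Enum
--
-- class Item(Enum):
--     Passage = 0
--     Rigid = 1
--     Wood = 2
--     Bomb = 3
--     Flames = 4
--     Fog = 5
--     ExtraBomb = 6 # adds ammo.
--     IncrRange = 7 # increases the blast_strength
--     Kick = 8 # can kick bombs by touching them.
--     Skull = 9 # randomly either reduces ammo, (capped at 1), reduces blast_strength (capped at 2), or increases blast_strength by 2.
--     Agent0 = 10
--     Agent1 = 11
--     Agent2 = 12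
--     Agent3 = 13
--
-- class Action(Enum):
--     Stop = 0
--     Up = 1
--     Down = 2
--     Left = 3
--     Right = 4
--     Bomb = 5
--     Pause = 6 # This pauses the game for 5 seconds.
--
-- class InvalidAction(Exception):
--     pass
--
-- def is_valid_direction(board, position, direction, invalid_values=None):
--     row, col = position
--     invalid_values = invalid_values or [item.value for item in [Item.Rigid, Item.Wood]]
--
--     if Action(direction) == Action.Stop:
--         return True
--
--     if Action(direction) == Action.Up:
--         return row - 1 >= 0 and board[row-1][col] not in invalid_values
--
--     if Action(direction) == Action.Down:
--         return row + 1 < len(board) and board[row+1][col] not in invalid_values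
--
--     if Action(direction) == Action.Left:
--         return col - 1 >= 0 and board[row][col-1] not in invalid_values
--
--     if Action(direction) == Action.Right:
--         return col + 1 < len(board[0]) and board[row][col+1] not in invalid_values
--
--     raise InvalidAction("We did not receive a valid direction: ", direction)
-- ===== SOURCE B (Python) =====
-- from enum import Enum
--
-- class Item(Enum):
--     Passage = 0
--     Rigid = 1
--     Wood = 2
--     Bomb = 3
--     Flames = 4
--     Fog = 5
--     ExtraBomb = 6
--     IncrRange = 7
--     Kick = 8
--     Skull = 9
--     Agent0 = 10
--     Agent1 = 11
--     Agent2 = 12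
--     Agent3 = 13
--
-- class Action(Enum):
--     Stop = 0
--     Up = 1
--     Down = 2
--     Left = 3
--     Right = 4
--     Bomb = 5
--     Pause = 6
--
-- class InvalidAction(Exception):
--     pass
--
-- _STEPS = {Action.Up: (-1, 0), Action.Down: (1, 0),
--           Action.Left: (0, -1), Action.Right: (0, 1)}
--
-- def is_valid_direction(board, position, direction, invalid_values=None):
--     action = Action(direction)
--     if action == Action.Stop:
--         return True
--     if action not in _STEPS:
--         raise InvalidAction("We did not receive a valid direction: ", direction)
--     blocked = invalid_values or [item.value for item in [Item.Rigid, Item.Wood]]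
--     row, col = position
--     # enumerate every valid move from this position, then answer by membership
--     valid_moves = []
--     for act, (dr, dc) in _STEPS.items():
--         r, c = row + dr, col + dc
--         if 0 <= r < len(board) and 0 <= c < len(board[r]) and board[r][c] not in blocked:
--             valid_moves.append(act)
--     return action in valid_moves
-- ===== Notes on version B (the rewrite author's own statement) =====
-- stated objective: alternative
-- what changed: Instead of A's per-direction branch that bounds-checks and reads only the requested neighbour, B enumerates all four neighbour cells once, builds the list of valid moves from this position (each neighbour checked uniformly against its own row's bounds), and answers by membership of the requested action in that list.
-- outside the precondition, e.g. on is_valid_direction([[3, 2]], (1, -2), 1, None): A returns True, B returns False; on is_valid_direction([[1, 0], [], [1, 1, 3]], (2, 1), 4, []): A returns False, B returns True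
import Mathlib
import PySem

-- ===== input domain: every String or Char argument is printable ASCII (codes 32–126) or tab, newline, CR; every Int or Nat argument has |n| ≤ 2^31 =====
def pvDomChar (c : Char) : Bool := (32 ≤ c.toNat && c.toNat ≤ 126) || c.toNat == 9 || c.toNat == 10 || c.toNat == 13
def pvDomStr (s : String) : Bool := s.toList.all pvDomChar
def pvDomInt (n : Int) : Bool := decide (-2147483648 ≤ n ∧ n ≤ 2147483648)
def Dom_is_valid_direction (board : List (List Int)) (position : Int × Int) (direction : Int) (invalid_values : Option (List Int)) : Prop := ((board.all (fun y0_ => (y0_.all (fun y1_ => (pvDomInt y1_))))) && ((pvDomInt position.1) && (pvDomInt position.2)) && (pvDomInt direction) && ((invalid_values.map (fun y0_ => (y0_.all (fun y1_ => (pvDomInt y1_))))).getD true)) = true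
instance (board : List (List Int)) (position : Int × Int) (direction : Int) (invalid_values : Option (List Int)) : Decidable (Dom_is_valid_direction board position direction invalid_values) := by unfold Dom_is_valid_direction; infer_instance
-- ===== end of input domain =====

-- B enumerates all four neighbour moves once, building the list of valid actions, and answers by membership,
-- instead of A's per-direction branch that tests only the requested neighbour (objective: alternative).


-- `invalid_values or [Item.Rigid.value, Item.Wood.value]` (both Pythons have this exact line)
def pvDefaultInvalid (invalid_values : Option (List Int)) : List Int :=
  match invalid_values with
  | none => [1, 2]
  | some l => if l = [] then [1, 2] else l

-- A's `board[r][c]` with Python indexing semantics (none = IndexError, excluded by Pre_)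
def pvCell (board : List (List Int)) (r c : Int) : Option Int :=
  match PySem.List.pyGet? board r with
  | none => none
  | some row => PySem.List.pyGet? row c

-- A's `board[r][c] not in iv` (the `none` default is never reached inside Pre_)
def pvNotIn (board : List (List Int)) (r c : Int) (iv : List Int) : Bool :=
  match pvCell board r c with
  | some v => !(iv.contains v)
  | none => false

-- ===== PORT A =====
def is_valid_direction (board : List (List Int)) (position : Int × Int) (direction : Int) (invalid_values : Option (List Int)) : Bool :=
  let row := position.1
  let col := position.2
  let iv := pvDefaultInvalid invalid_values
  if direction = 0 then true
  else if direction = 1 then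
    decide (row - 1 ≥ 0) && pvNotIn board (row - 1) col iv
  else if direction = 2 then
    decide (row + 1 < (board.length : Int)) && pvNotIn board (row + 1) col iv
  else if direction = 3 then
    decide (col - 1 ≥ 0) && pvNotIn board row (col - 1) iv
  else if direction = 4 then
    decide (col + 1 < ((board.headD []).length : Int)) && pvNotIn board row (col + 1) iv
  else
    false  -- A raises InvalidAction / ValueError here; excluded by Pre_

-- ===== PORT B =====
-- B's `_STEPS` table: direction value -> (drow, dcol)
def pvSteps : List (Int × (Int × Int)) := [(1, (-1, 0)), (2, (1, 0)), (3, (0, -1)), (4, (0, 1))]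

-- B's loop-body test `0 <= r < len(board) and 0 <= c < len(board[r]) and board[r][c] not in blocked`
-- (board[r] / board[r][c] are only read under the in-range guards, so the getD defaults are never reached)
def pvPassable (board : List (List Int)) (r c : Int) (blocked : List Int) : Bool :=
  decide (0 ≤ r ∧ r < (board.length : Int)) &&
    (let rowl := (PySem.List.pyGet? board r).getD [];
     decide (0 ≤ c ∧ c < (rowl.length : Int)) && !(blocked.contains ((PySem.List.pyGet? rowl c).getD 0)))

def is_valid_direction_alt (board : List (List Int)) (position : Int × Int) (direction : Int) (invalid_values : Option (List Int)) : Bool :=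
  if direction = 0 then true
  else if (pvSteps.lookup direction).isNone then false  -- B raises InvalidAction / ValueError here; excluded by Pre_
  else
    let blocked := pvDefaultInvalid invalid_values
    let valid_moves := pvSteps.foldl (fun acc s =>
      if pvPassable board (position.1 + s.2.1) (position.2 + s.2.2) blocked then acc ++ [s.1] else acc) []
    valid_moves.contains direction

-- ===== PRECONDITION & SPEC =====
-- length of row i of the board (0 if there is no such row), as an Int
def pvRowLen (board : List (List Int)) (i : Int) : Int :=
  (((PySem.List.pyGet? board i).getD []).length : Int)

-- Pre_ excludes directions outside {0,1,2,3,4}, on which both programs raise (ValueError / InvalidAction), and,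
-- for a moving direction, the inputs where A's board[new_row][new_col] access raises IndexError, reads a cell
-- through Python's negative-index wraparound, or (direction Right on a ragged board) compares against len(board[0])
-- where a row of a different length is involved — accidental corners no caller of this grid helper would specify.
def Pre_is_valid_direction (board : List (List Int)) (position : Int × Int) (direction : Int) (invalid_values : Option (List Int)) : Prop :=
  direction = 0 ∨
  (direction = 1 ∧ (position.1 ≤ 0 ∨
    (1 ≤ position.1 ∧ position.1 - 1 < (board.length : Int) ∧ 0 ≤ position.2 ∧
     position.2 < pvRowLen board (position.1 - 1)))) ∨
  (direction = 2 ∧ ((board.length : Int) ≤ position.1 + 1 ∨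
    (0 ≤ position.1 + 1 ∧ position.1 + 1 < (board.length : Int) ∧ 0 ≤ position.2 ∧
     position.2 < pvRowLen board (position.1 + 1)))) ∨
  (direction = 3 ∧ (position.2 ≤ 0 ∨
    (0 ≤ position.1 ∧ position.1 < (board.length : Int) ∧ 1 ≤ position.2 ∧
     position.2 - 1 < pvRowLen board position.1))) ∨
  (direction = 4 ∧ board ≠ [] ∧
    ((((board.headD []).length : Int) ≤ position.2 + 1 ∧
      (¬ (0 ≤ position.1 ∧ position.1 < (board.length : Int)) ∨ pvRowLen board position.1 ≤ position.2 + 1)) ∨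
     (0 ≤ position.2 + 1 ∧ position.2 + 1 < ((board.headD []).length : Int) ∧
      0 ≤ position.1 ∧ position.1 < (board.length : Int) ∧ position.2 + 1 < pvRowLen board position.1)))
instance (board : List (List Int)) (position : Int × Int) (direction : Int) (invalid_values : Option (List Int)) : Decidable (Pre_is_valid_direction board position direction invalid_values) := by unfold Pre_is_valid_direction; infer_instance

def pvWitness_is_valid_direction : List (List Int) × (Int × Int) × Int × Option (List Int) :=
  ([[0, 1], [2, 0]], (0, 0), 2, none)

def Spec_is_valid_direction (board : List (List Int)) (position : Int × Int) (direction : Int) (invalid_values : Option (List Int)) (out : Bool) : Prop := out = is_valid_direction_alt board position direction invalid_values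
instance (board : List (List Int)) (position : Int × Int) (direction : Int) (invalid_values : Option (List Int)) (out : Bool) : Decidable (Spec_is_valid_direction board position direction invalid_values out) := by unfold Spec_is_valid_direction; infer_instance

-- ===== CLAIM (what is proved, stated in full; the proofs are below) =====
def Claim_equal_is_valid_direction : Prop := ∀ (board : List (List Int)) (position : Int × Int) (direction : Int) (invalid_values : Option (List Int)), Dom_is_valid_direction board position direction invalid_values → Pre_is_valid_direction board position direction invalid_values → Spec_is_valid_direction board position direction invalid_values (is_valid_direction board position direction invalid_values)

-- ===== LEMMAS AND PROOFS =====
-- B's answer for a moving direction d ∈ {1,2,3,4} is exactly the passability of d's own target cell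
-- (the other three appended actions are distinct from d, so they do not affect membership).
theorem alt_eval (board : List (List Int)) (position : Int × Int) (invalid_values : Option (List Int))
    (d dr dc : Int) (hm : (d, (dr, dc)) ∈ pvSteps) :
    is_valid_direction_alt board position d invalid_values
      = pvPassable board (position.1 + dr) (position.2 + dc) (pvDefaultInvalid invalid_values) := by
  fin_cases hm <;>
  · simp only [is_valid_direction_alt, pvSteps, List.lookup, List.foldl]
    cases h1 : pvPassable board (position.1 + -1) (position.2 + 0) (pvDefaultInvalid invalid_values) <;>
    cases h2 : pvPassable board (position.1 + 1) (position.2 + 0) (pvDefaultInvalid invalid_values) <;>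
    cases h3 : pvPassable board (position.1 + 0) (position.2 + -1) (pvDefaultInvalid invalid_values) <;>
    cases h4 : pvPassable board (position.1 + 0) (position.2 + 1) (pvDefaultInvalid invalid_values) <;>
    simp_all

-- unfolding A at each literal direction
theorem a_eval_1 (board : List (List Int)) (position : Int × Int) (iv : Option (List Int)) :
    is_valid_direction board position 1 iv
      = (decide (position.1 - 1 ≥ 0) && pvNotIn board (position.1 - 1) position.2 (pvDefaultInvalid iv)) := rfl
theorem a_eval_2 (board : List (List Int)) (position : Int × Int) (iv : Option (List Int)) :
    is_valid_direction board position 2 iv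
      = (decide (position.1 + 1 < (board.length : Int)) && pvNotIn board (position.1 + 1) position.2 (pvDefaultInvalid iv)) := rfl
theorem a_eval_3 (board : List (List Int)) (position : Int × Int) (iv : Option (List Int)) :
    is_valid_direction board position 3 iv
      = (decide (position.2 - 1 ≥ 0) && pvNotIn board position.1 (position.2 - 1) (pvDefaultInvalid iv)) := rfl
theorem a_eval_4 (board : List (List Int)) (position : Int × Int) (iv : Option (List Int)) :
    is_valid_direction board position 4 iv
      = (decide (position.2 + 1 < ((board.headD []).length : Int)) && pvNotIn board position.1 (position.2 + 1) (pvDefaultInvalid iv)) := rfl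

-- A's cell test equals B's passability test when the target (r, c) is fully in range of its own row.
theorem notIn_eq_passable (board : List (List Int)) (r c : Int) (iv : List Int)
    (hr0 : 0 ≤ r) (hr : r < (board.length : Int)) (hc0 : 0 ≤ c) (hc : c < pvRowLen board r) :
    pvNotIn board r c iv = pvPassable board r c iv := by
  have hrow : PySem.List.pyGet? board r = some (board[r.toNat]'(by omega)) :=
    PySem.List.pyGet?_eq_some_getElem board hr0 hr
  have hcn : c < (((board[r.toNat]'(by omega)).length : Nat) : Int) := by
    simpa [pvRowLen, hrow] using hc
  have hcell : PySem.List.pyGet? (board[r.toNat]'(by omega)) c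
      = some ((board[r.toNat]'(by omega))[c.toNat]'(by omega)) :=
    PySem.List.pyGet?_eq_some_getElem _ hc0 hcn
  simp [pvNotIn, pvCell, pvPassable, hr0, hr, hc0, hcn]

theorem passable_false_r (board : List (List Int)) (r c : Int) (iv : List Int)
    (h : ¬ (0 ≤ r ∧ r < (board.length : Int))) : pvPassable board r c iv = false := by
  simp only [pvPassable]
  rw [decide_eq_false h, Bool.false_and]

theorem passable_false_c (board : List (List Int)) (r c : Int) (iv : List Int)
    (h : ¬ (0 ≤ c ∧ c < pvRowLen board r)) : pvPassable board r c iv = false := by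
  simp only [pvPassable, pvRowLen] at *
  rw [decide_eq_false h, Bool.false_and, Bool.and_false]

theorem is_valid_direction_equal (board : List (List Int)) (position : Int × Int) (direction : Int)
    (invalid_values : Option (List Int)) (h : Pre_is_valid_direction board position direction invalid_values) :
    is_valid_direction board position direction invalid_values
      = is_valid_direction_alt board position direction invalid_values := by
  rcases h with h0 | ⟨h1, hc⟩ | ⟨h2, hc⟩ | ⟨h3, hc⟩ | ⟨h4, hne, hc⟩
  · simp [is_valid_direction, is_valid_direction_alt, h0]
  · subst h1
    rw [a_eval_1, alt_eval board position invalid_values 1 (-1) 0 (by simp [pvSteps]),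
        show position.1 + -1 = position.1 - 1 from by ring, show position.2 + 0 = position.2 from by ring]
    rcases hc with he | ⟨ha, hb, hc0, hw⟩
    · rw [decide_eq_false (show ¬ position.1 - 1 ≥ 0 from by omega), Bool.false_and,
          passable_false_r _ _ _ _ (by omega)]
    · rw [decide_eq_true (show position.1 - 1 ≥ 0 from by omega), Bool.true_and,
          notIn_eq_passable board _ _ _ (by omega) hb hc0 hw]
  · subst h2
    rw [a_eval_2, alt_eval board position invalid_values 2 1 0 (by simp [pvSteps]),
        show position.2 + 0 = position.2 from by ring]
    rcases hc with he | ⟨ha, hb, hc0, hw⟩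
    · rw [decide_eq_false (show ¬ position.1 + 1 < (board.length : Int) from by omega), Bool.false_and,
          passable_false_r _ _ _ _ (by omega)]
    · rw [decide_eq_true hb, Bool.true_and, notIn_eq_passable board _ _ _ ha hb hc0 hw]
  · subst h3
    rw [a_eval_3, alt_eval board position invalid_values 3 0 (-1) (by simp [pvSteps]),
        show position.2 + -1 = position.2 - 1 from by ring, show position.1 + 0 = position.1 from by ring]
    rcases hc with he | ⟨ha, hb, hc0, hw⟩
    · rw [decide_eq_false (show ¬ position.2 - 1 ≥ 0 from by omega), Bool.false_and,
          passable_false_c _ _ _ _ (by omega)]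
    · rw [decide_eq_true (show position.2 - 1 ≥ 0 from by omega), Bool.true_and,
          notIn_eq_passable board _ _ _ ha hb (by omega) hw]
  · subst h4
    rw [a_eval_4, alt_eval board position invalid_values 4 0 1 (by simp [pvSteps]),
        show position.1 + 0 = position.1 from by ring]
    rcases hc with ⟨he, hrow⟩ | ⟨ha, hb, hr0, hr, hw⟩
    · rw [decide_eq_false (show ¬ position.2 + 1 < ((board.headD []).length : Int) from by omega), Bool.false_and]
      rcases hrow with hout | hshort
      · rw [passable_false_r _ _ _ _ hout]
      · rw [passable_false_c _ _ _ _ (by omega)]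
    · rw [decide_eq_true hb, Bool.true_and, notIn_eq_passable board _ _ _ hr0 hr ha hw]

-- ===== VERDICT (by name: the statement is the Claim_ definition above) =====
theorem is_valid_direction_spec : Claim_equal_is_valid_direction := by
  intro board position direction invalid_values _ hpre
  exact is_valid_direction_equal board position direction invalid_values hpre
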